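-- pv_equiv track=rewrite | github.com/farinacci/lispers.net | build/releases/release-0.581/ob/provision-lisp.py | i1iIIIiI1I
-- ===== SOURCE A (Python) =====
-- def i1iIIIiI1I ( lisp_config ) :
--  OOoO000O0OO = lisp_config . split ( "\n" )
--  if 23 - 23: i11iIiiIii + I1IiiI
--  oOo = i1 = oOOoo00O0O = None
--  oOoOoO = False
--  for ii1I in OOoO000O0OO :
--   if ( oOoOoO == False ) :
--    oOoOoO = ( ii1I . find ( "database-mapping" ) != - 1 )
--    continue
--    if 76 - 76: O0 / o0oOOo0O0Ooo . I1IiiI * Ii1I - OOooOOo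
--    if 76 - 76: i11iIiiIii / iIii1I11I1II1 . I1ii11iIi11i % OOooOOo / OoooooooOO % oO0o
--   if ( oOo == None and ii1I . find ( "instance-id = " ) != - 1 ) :
--    oOo = ii1I . split ( " = " ) [ - 1 ]
--    if 75 - 75: iII111i
--   if ( ii1I . find ( "eid-prefix = " ) != - 1 ) :
--    iiiI11 = ii1I . split ( " = " ) [ - 1 ]
--    iiiI11 = iiiI11 . split ( "/" ) [ 0 ]
--    if ( i1 == None and iiiI11 . count ( "." ) == 3 ) : i1 = iiiI11
--    if ( oOOoo00O0O == None and iiiI11 . find ( ":" ) != - 1 ) : oOOoo00O0O = iiiI11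
--    if 97 - 97: i11iIiiIii
--   if ( oOo != None and i1 != None and oOOoo00O0O != None ) : break
--   if 32 - 32: Oo0Ooo * O0 % oO0o % Ii1I . IiII
--  return ( oOo , i1 , oOOoo00O0O )
--  if 61 - 61: ooOoO0o
--  if 79 - 79: Oo0Ooo + I1IiiI - iII111i
--  if 83 - 83: ooOoO0o
--  if 64 - 64: OoO0O00 % ooOoO0o % iII111i / OoOoOO00 - OoO0O00
--  if 74 - 74: iII111i * O0
--  if 89 - 89: oO0o + Oo0Ooo
--  if 3 - 3: i1IIi / I1IiiI % I11i * i11iIiiIii / O0 * I11i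
-- ===== SOURCE B (Python) =====
-- def _val(line):
--     return line.split(" = ")[-1]
--
-- def i1iIIIiI1I(lisp_config):
--     lines = lisp_config.split("\n")
--     rest = None
--     for i, line in enumerate(lines):
--         if "database-mapping" in line:
--             rest = lines[i + 1:]
--             break
--     if rest is None:
--         return (None, None, None)
--     iid = next((_val(l) for l in rest if "instance-id = " in l), None)
--     prefixes = [_val(l).split("/")[0] for l in rest if "eid-prefix = " in l]
--     ipv4 = next((p for p in prefixes if p.count(".") == 3), None)
--     ipv6 = next((p for p in prefixes if ":" in p), None)
--     return (iid, ipv4, ipv6)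
-- ===== Notes on version B (the rewrite author's own statement) =====
-- stated objective: simpler
-- what changed: A's single stateful loop with an interleaved accumulator triple, marker flag and early break is replaced by finding the marker line once and then three independent first-match searches (instance-id, first dotted eid-prefix, first colon eid-prefix) over the lines after it.
import Mathlib
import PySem

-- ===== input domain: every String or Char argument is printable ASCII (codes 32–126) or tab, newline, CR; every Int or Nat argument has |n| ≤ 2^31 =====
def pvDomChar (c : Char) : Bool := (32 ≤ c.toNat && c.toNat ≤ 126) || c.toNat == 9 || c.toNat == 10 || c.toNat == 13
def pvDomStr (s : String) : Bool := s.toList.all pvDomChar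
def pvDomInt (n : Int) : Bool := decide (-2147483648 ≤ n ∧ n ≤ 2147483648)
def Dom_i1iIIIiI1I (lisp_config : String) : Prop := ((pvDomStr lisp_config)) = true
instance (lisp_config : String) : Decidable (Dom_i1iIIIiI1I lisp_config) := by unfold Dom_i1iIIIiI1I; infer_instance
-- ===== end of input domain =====

-- B replaces A's single interleaved accumulator loop (with early break) by a marker search plus three
-- independent first-match scans over the lines after the marker; objective: simpler, same cost.

-- s.split(sep) for a NONEMPTY literal sep (split? is none only for sep = "", so getD never fires)
def pvSplit (s sep : String) : List String :=
  (PySem.Str.split? s sep).getD []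

-- line.split(" = ")[-1]  (split is never empty, so [-1] never raises)
def pvVal (l : String) : String :=
  PySem.List.pyGetD (pvSplit l " = ") (-1) ""

-- line.split(" = ")[-1].split("/")[0]
def pvEidVal (l : String) : String :=
  PySem.List.pyGetD (pvSplit (pvVal l) "/") 0 ""

-- ===== PORT A =====
-- the instance-id branch of A's loop body acting on oOo
def pvStepA (l : String) (a : Option String) : Option String :=
  if a = none ∧ PySem.Str.find l "instance-id = " ≠ -1 then some (pvVal l) else a

-- the eid-prefix branch of A's loop body acting on (i1, oOOoo00O0O)
def pvStepBC (l : String) (b c : Option String) : Option String × Option String :=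
  if PySem.Str.find l "eid-prefix = " ≠ -1 then
    (if b = none ∧ PySem.Str.count (pvEidVal l) "." = 3 then some (pvEidVal l) else b,
     if c = none ∧ PySem.Str.find (pvEidVal l) ":" ≠ -1 then some (pvEidVal l) else c)
  else (b, c)

-- A's for-loop over the split lines: state (oOo, i1, oOOoo00O0O, flag), continue while flag is False,
-- then the two branches and the end-of-body break once all three are set
def pvAGo : List String → Option String → Option String → Option String → Bool →
    Option String × Option String × Option String
  | [], a, b, c, _ => (a, b, c)
  | l :: ls, a, b, c, flag =>
    if flag = false then
      pvAGo ls a b c (decide (PySem.Str.find l "database-mapping" ≠ -1))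
    else
      if pvStepA l a ≠ none ∧ (pvStepBC l b c).1 ≠ none ∧ (pvStepBC l b c).2 ≠ none then
        (pvStepA l a, (pvStepBC l b c).1, (pvStepBC l b c).2)
      else
        pvAGo ls (pvStepA l a) (pvStepBC l b c).1 (pvStepBC l b c).2 flag

def i1iIIIiI1I (lisp_config : String) : Option String × Option String × Option String :=
  pvAGo (pvSplit lisp_config "\n") none none none false

-- ===== PORT B =====
-- the for/break marker search: the lines after the first line containing "database-mapping", if any
def pvFindRest : List String → Option (List String)
  | [] => none
  | l :: ls => if PySem.Str.isIn "database-mapping" l then some ls else pvFindRest ls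

-- next((_val(l) for l in rest if "instance-id = " in l), None)
def pvFindIid : List String → Option String
  | [] => none
  | l :: ls => if PySem.Str.isIn "instance-id = " l then some (pvVal l) else pvFindIid ls

-- [_val(l).split("/")[0] for l in rest if "eid-prefix = " in l]
def pvPrefixes (rest : List String) : List String :=
  (rest.filter (fun l => PySem.Str.isIn "eid-prefix = " l)).map pvEidVal

def i1iIIIiI1I_alt (lisp_config : String) : Option String × Option String × Option String :=
  match pvFindRest (pvSplit lisp_config "\n") with
  | none => (none, none, none)
  | some rest =>
    (pvFindIid rest,
     (pvPrefixes rest).find? (fun p => PySem.Str.count p "." == 3),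
     (pvPrefixes rest).find? (fun p => PySem.Str.isIn ":" p))

-- ===== PRECONDITION & SPEC =====
def Spec_i1iIIIiI1I (lisp_config : String) (out : Option String × Option String × Option String) : Prop := out = i1iIIIiI1I_alt lisp_config
instance (lisp_config : String) (out : Option String × Option String × Option String) : Decidable (Spec_i1iIIIiI1I lisp_config out) := by unfold Spec_i1iIIIiI1I; infer_instance

-- ===== CLAIM (what is proved, stated in full; the proofs are below) =====
def Claim_equal_i1iIIIiI1I : Prop := ∀ (lisp_config : String), Dom_i1iIIIiI1I lisp_config → Spec_i1iIIIiI1I lisp_config (i1iIIIiI1I lisp_config)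

-- ===== LEMMAS AND PROOFS =====

-- B's 'sub in s' is A's 's.find(sub) != -1'
lemma pvIsIn_eq_decide (sub s : String) :
    PySem.Str.isIn sub s = decide (PySem.Str.find s sub ≠ -1) := by
  by_cases h : sub.toList <:+: s.toList
  · rw [(PySem.Str.isIn_iff_infix sub s).mpr h,
      decide_eq_true ((PySem.Str.find_ne_neg_one_iff s sub).mpr h)]
  · have h1 : PySem.Str.isIn sub s = false := by
      rw [← Bool.not_eq_true, (PySem.Str.isIn_iff_infix sub s)]; exact h
    rw [h1, decide_eq_false (by rw [PySem.Str.find_ne_neg_one_iff]; exact h)]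

-- pvPrefixes on a cons, with the filter condition in A's form
lemma pvPrefixes_cons (l : String) (ls : List String) :
    pvPrefixes (l :: ls) =
      if PySem.Str.find l "eid-prefix = " ≠ -1 then pvEidVal l :: pvPrefixes ls
      else pvPrefixes ls := by
  by_cases h : PySem.Str.find l "eid-prefix = " ≠ -1
  · rw [pvPrefixes, List.filter_cons, pvIsIn_eq_decide, decide_eq_true h, if_pos rfl,
      List.map_cons, ← pvPrefixes, if_pos h]
  · rw [pvPrefixes, List.filter_cons, pvIsIn_eq_decide, decide_eq_false h, if_neg (by simp),
      ← pvPrefixes, if_neg h]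

-- one step of A's instance-id branch agrees with B's lazy search
lemma pvStepA_or (l : String) (a : Option String) (ls : List String) :
    (pvStepA l a).or (pvFindIid ls) = a.or (pvFindIid (l :: ls)) := by
  rw [pvFindIid, pvIsIn_eq_decide, pvStepA]
  by_cases h : PySem.Str.find l "instance-id = " ≠ -1
  · rw [decide_eq_true h, if_pos rfl]
    cases a with
    | none => rw [if_pos ⟨rfl, h⟩, Option.some_or, Option.none_or]
    | some x =>
      rw [if_neg (fun hq => Option.some_ne_none x hq.1), Option.some_or, Option.some_or]
  · rw [decide_eq_false h, if_neg Bool.false_ne_true]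
    cases a with
    | none => rw [if_neg (fun hq => h hq.2)]
    | some x => rw [if_neg (fun hq => Option.some_ne_none x hq.1)]

-- one step of A's ipv4 half of the eid-prefix branch agrees with B's lazy search
lemma pvStepBC_or1 (l : String) (b c : Option String) (ls : List String) :
    ((pvStepBC l b c).1).or ((pvPrefixes ls).find? (fun p => PySem.Str.count p "." == 3))
      = b.or ((pvPrefixes (l :: ls)).find? (fun p => PySem.Str.count p "." == 3)) := by
  rw [pvPrefixes_cons, pvStepBC]
  by_cases he : PySem.Str.find l "eid-prefix = " ≠ -1
  · rw [if_pos he, if_pos he]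
    dsimp only
    by_cases h4 : PySem.Str.count (pvEidVal l) "." = 3
    · rw [List.find?_cons_of_pos (p := fun p => PySem.Str.count p "." == 3)
        (show (PySem.Str.count (pvEidVal l) "." == 3) = true from beq_iff_eq.mpr h4)]
      cases b with
      | none => rw [if_pos ⟨rfl, h4⟩, Option.some_or, Option.none_or]
      | some x =>
        rw [if_neg (fun hq => Option.some_ne_none x hq.1), Option.some_or, Option.some_or]
    · rw [List.find?_cons_of_neg (p := fun p => PySem.Str.count p "." == 3)
        (show ¬(PySem.Str.count (pvEidVal l) "." == 3) = true from
          fun hq => h4 (beq_iff_eq.mp hq))]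
      cases b with
      | none => rw [if_neg (fun hq => h4 hq.2)]
      | some x => rw [if_neg (fun hq => Option.some_ne_none x hq.1)]
  · rw [if_neg he, if_neg he]

-- one step of A's ipv6 half of the eid-prefix branch agrees with B's lazy search
lemma pvStepBC_or2 (l : String) (b c : Option String) (ls : List String) :
    ((pvStepBC l b c).2).or ((pvPrefixes ls).find? (fun p => PySem.Str.isIn ":" p))
      = c.or ((pvPrefixes (l :: ls)).find? (fun p => PySem.Str.isIn ":" p)) := by
  rw [pvPrefixes_cons, pvStepBC]
  by_cases he : PySem.Str.find l "eid-prefix = " ≠ -1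
  · rw [if_pos he, if_pos he]
    dsimp only
    by_cases h6 : PySem.Str.find (pvEidVal l) ":" ≠ -1
    · rw [List.find?_cons_of_pos (p := fun p => PySem.Str.isIn ":" p)
        (show PySem.Str.isIn ":" (pvEidVal l) = true by
          rw [pvIsIn_eq_decide, decide_eq_true h6])]
      cases c with
      | none => rw [if_pos ⟨rfl, h6⟩, Option.some_or, Option.none_or]
      | some x =>
        rw [if_neg (fun hq => Option.some_ne_none x hq.1), Option.some_or, Option.some_or]
    · rw [List.find?_cons_of_neg (p := fun p => PySem.Str.isIn ":" p)
        (show ¬PySem.Str.isIn ":" (pvEidVal l) = true by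
          rw [pvIsIn_eq_decide, decide_eq_false h6]; exact Bool.false_ne_true)]
      cases c with
      | none => rw [if_neg (fun hq => h6 hq.2)]
      | some x => rw [if_neg (fun hq => Option.some_ne_none x hq.1)]
  · rw [if_neg he, if_neg he]

-- phase 2 of A's loop (flag already true) computes B's three independent searches
lemma pvAGo_true (ls : List String) : ∀ (a b c : Option String),
    pvAGo ls a b c true =
      (a.or (pvFindIid ls),
       b.or ((pvPrefixes ls).find? (fun p => PySem.Str.count p "." == 3)),
       c.or ((pvPrefixes ls).find? (fun p => PySem.Str.isIn ":" p))) := by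
  induction ls with
  | nil =>
    intro a b c
    rw [pvAGo, pvFindIid, show pvPrefixes [] = [] from rfl, List.find?_nil, List.find?_nil,
      Option.or_none, Option.or_none, Option.or_none]
  | cons l ls ih =>
    intro a b c
    rw [pvAGo, if_neg (fun hq => Bool.noConfusion hq), ← pvStepA_or, ← pvStepBC_or1,
      ← pvStepBC_or2]
    by_cases hbrk : pvStepA l a ≠ none ∧ (pvStepBC l b c).1 ≠ none ∧ (pvStepBC l b c).2 ≠ none
    · rw [if_pos hbrk]
      obtain ⟨h1, h2, h3⟩ := hbrk
      obtain ⟨va, ha⟩ := Option.ne_none_iff_exists'.mp h1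
      obtain ⟨vb, hb⟩ := Option.ne_none_iff_exists'.mp h2
      obtain ⟨vc, hc⟩ := Option.ne_none_iff_exists'.mp h3
      rw [ha, hb, hc, Option.some_or, Option.some_or, Option.some_or]
    · rw [if_neg hbrk, ih]

-- phase 1: seek the marker line; the state stays (None, None, None)
lemma pvAGo_false (ls : List String) :
    pvAGo ls none none none false =
      match pvFindRest ls with
      | none => (none, none, none)
      | some rest => pvAGo rest none none none true := by
  induction ls with
  | nil => rw [pvAGo, pvFindRest]
  | cons l ls ih =>
    rw [pvAGo, if_pos rfl, pvFindRest, pvIsIn_eq_decide]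
    by_cases h : PySem.Str.find l "database-mapping" ≠ -1
    · rw [decide_eq_true h, if_pos rfl]
    · rw [decide_eq_false h, if_neg Bool.false_ne_true, ih]

-- ===== VERDICT (by name: the statement is the Claim_ definition above) =====
theorem i1iIIIiI1I_spec : Claim_equal_i1iIIIiI1I := by
  intro s _
  unfold Spec_i1iIIIiI1I i1iIIIiI1I i1iIIIiI1I_alt
  rw [pvAGo_false]
  cases pvFindRest (pvSplit s "\n") with
  | none => rfl
  | some rest =>
    dsimp only
    rw [pvAGo_true, Option.none_or, Option.none_or, Option.none_or]
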